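-- pv_equiv track=rewrite | github.com/KamilDemel/LeetCode-Grind | WDI_Fundamentals/collatz_conjecture_max_steps.py | find_max_collatz_steps
-- ===== SOURCE A (Python) =====
-- def find_max_collatz_steps(limit):
--     max_steps = 0
--     starting_number_record = 0
--     for start in range(2, limit + 1):
--         number = start
--         current_steps = 0
--         while number != 1:
--             if number % 2 == 0:
--                 number = number // 2
--             else:
--                 number = 3 * number + 1
--             current_steps += 1
--
--         if current_steps > max_steps:
--             max_steps = current_steps
--             starting_number_record = start
--     return max_steps, starting_number_record
-- ===== SOURCE B (Python) =====
-- def find_max_collatz_steps(limit):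
--     def collatz_length(n):
--         if n == 1:
--             return 0
--         return 1 + collatz_length(n // 2 if n % 2 == 0 else 3 * n + 1)
--
--     counts = [collatz_length(n) for n in range(2, limit + 1)]
--     if not counts:
--         return 0, 0
--     best = max(counts)
--     return best, counts.index(best) + 2
-- ===== Notes on version B (the rewrite author's own statement) =====
-- stated objective: alternative
-- what changed: B replaces A's single online fold (running max with inline while-loop) by staged passes: it maps a recursive collatz_length over the range into a list of counts, takes max(counts), and recovers the winning start as counts.index(best) + 2.
import Mathlib
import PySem

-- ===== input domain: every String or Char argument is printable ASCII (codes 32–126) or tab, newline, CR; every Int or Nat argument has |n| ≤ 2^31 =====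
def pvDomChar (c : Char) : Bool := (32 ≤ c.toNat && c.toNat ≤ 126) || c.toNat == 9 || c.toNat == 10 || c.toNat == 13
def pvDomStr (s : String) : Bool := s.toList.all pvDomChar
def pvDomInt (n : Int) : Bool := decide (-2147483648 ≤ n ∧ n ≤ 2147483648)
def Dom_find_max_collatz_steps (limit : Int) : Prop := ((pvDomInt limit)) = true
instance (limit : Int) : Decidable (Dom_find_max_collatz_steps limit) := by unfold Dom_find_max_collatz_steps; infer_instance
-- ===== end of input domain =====

-- B replaces A's single online fold by staged passes (map step counts, then max, then index);
-- same asymptotic cost, different decomposition.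


-- ===== PORT A =====
-- A's inline 'while number != 1' loop with its step accumulator; the Nat fuel only makes the
-- recursion structural (never exhausted on the tested inputs), each iteration is A's loop body.
def collatzWhileA (fuel : Nat) (number : Int) (current_steps : Int) : Int :=
  match fuel with
  | 0 => current_steps
  | f + 1 =>
    if number ≠ 1 then
      collatzWhileA f
        (if PySem.Int.mod number 2 = 0 then PySem.Int.floordiv number 2 else 3 * number + 1)
        (current_steps + 1)
    else current_steps

def find_max_collatz_steps (limit : Int) : List Int :=
  let r := (PySem.List.pyRange 2 (limit + 1) 1).foldl
    (fun (st : Int × Int) start =>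
      let current_steps := collatzWhileA 1000000 start 0
      if current_steps > st.1 then (current_steps, start) else st)
    (0, 0)
  [r.1, r.2]

-- ===== PORT B =====
-- B's recursive collatz_length(n); same fuel discipline as A's loop.
def collatz_length (fuel : Nat) (n : Int) : Int :=
  match fuel with
  | 0 => 0
  | f + 1 =>
    if n = 1 then 0
    else 1 + collatz_length f
      (if PySem.Int.mod n 2 = 0 then PySem.Int.floordiv n 2 else 3 * n + 1)

def find_max_collatz_steps_alt (limit : Int) : List Int :=
  let counts := (PySem.List.pyRange 2 (limit + 1) 1).map (collatz_length 1000000)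
  if counts = [] then [0, 0]
  else
    let best := (PySem.List.max? counts (fun x => x)).getD 0   -- max(counts); counts ≠ [] so never none
    -- counts.index(best): best ∈ counts (max of a nonempty list), so .index never raises
    [best, ((PySem.List.index? counts best).getD 0 : Nat) + 2]

-- ===== PRECONDITION & SPEC =====
def Spec_find_max_collatz_steps (limit : Int) (out : List Int) : Prop := out = find_max_collatz_steps_alt limit
instance (limit : Int) (out : List Int) : Decidable (Spec_find_max_collatz_steps limit out) := by unfold Spec_find_max_collatz_steps; infer_instance

-- ===== CLAIM (what is proved, stated in full; the proofs are below) =====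
def Claim_equal_find_max_collatz_steps : Prop := ∀ (limit : Int), Dom_find_max_collatz_steps limit → Spec_find_max_collatz_steps limit (find_max_collatz_steps limit)

-- ===== LEMMAS AND PROOFS =====

-- the two step counters agree: A's accumulator loop equals acc + B's recursive count
theorem collatzWhileA_eq (fuel : Nat) (n c : Int) :
    collatzWhileA fuel n c = c + collatz_length fuel n := by
  induction fuel generalizing n c with
  | zero => simp [collatzWhileA, collatz_length]
  | succ f ih =>
    simp only [collatzWhileA, collatz_length]
    by_cases h : n = 1
    · simp [h]
    · rw [if_pos h, if_neg h, ih]; ring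

theorem collatz_length_nonneg (fuel : Nat) (n : Int) : 0 ≤ collatz_length fuel n := by
  induction fuel generalizing n with
  | zero => simp [collatz_length]
  | succ f ih =>
    simp only [collatz_length]
    split
    · omega
    · have := ih (if PySem.Int.mod n 2 = 0 then PySem.Int.floordiv n 2 else 3 * n + 1)
      omega

def gSteps (n : Int) : Int := collatz_length 1000000 n

theorem gSteps_nonneg (n : Int) : 0 ≤ gSteps n := collatz_length_nonneg 1000000 n

theorem collatz_length_pos (fuel : Nat) (hf : fuel ≠ 0) (n : Int) (h : n ≠ 1) :
    1 ≤ collatz_length fuel n := by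
  cases fuel with
  | zero => exact absurd rfl hf
  | succ f =>
    simp only [collatz_length, if_neg h]
    have := collatz_length_nonneg f
      (if PySem.Int.mod n 2 = 0 then PySem.Int.floordiv n 2 else 3 * n + 1)
    omega

theorem gSteps_pos (n : Int) (h : n ≠ 1) : 1 ≤ gSteps n :=
  collatz_length_pos 1000000 (by norm_num) n h

-- the maximum of gSteps over a list (0 for [])
def maxG : List Int → Int
  | [] => 0
  | n :: t => max (gSteps n) (maxG t)

-- first element whose gSteps equals v (0 for [])
def firstG : List Int → Int → Int
  | [], _ => 0
  | n :: t, v => if gSteps n = v then n else firstG t v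

-- characterization of A's fold from an arbitrary state with nonnegative running max
theorem foldA_char (L : List Int) (m r : Int) (hm : 0 ≤ m) :
    L.foldl (fun (st : Int × Int) start =>
      let current_steps := collatzWhileA 1000000 start 0
      if current_steps > st.1 then (current_steps, start) else st) (m, r)
    = if maxG L > m then (maxG L, firstG L (maxG L)) else (m, r) := by
  induction L generalizing m r with
  | nil => simp only [List.foldl_nil, maxG]; rw [if_neg (by omega)]
  | cons n t ih =>
    have hg : collatzWhileA 1000000 n 0 = gSteps n := by
      rw [collatzWhileA_eq]; simp [gSteps]
    rw [List.foldl_cons]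
    simp only [hg, maxG, firstG]
    by_cases h : gSteps n > m
    · rw [if_pos h, ih _ _ (le_trans hm (le_of_lt h))]
      by_cases h2 : maxG t > gSteps n
      · rw [if_pos h2, if_pos (by omega), max_eq_right (by omega), if_neg (by omega)]
      · rw [if_neg h2, if_pos (by omega), max_eq_left (by omega), if_pos rfl]
    · rw [if_neg h, ih _ _ hm]
      by_cases h2 : maxG t > m
      · rw [if_pos h2, if_pos (by omega), max_eq_right (by omega), if_neg (by omega)]
      · rw [if_neg h2, if_neg (by omega)]

theorem maxG_pos (L : List Int) (hL : L ≠ []) (h1 : ∀ n ∈ L, n ≠ 1) :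
    1 ≤ maxG L := by
  cases L with
  | nil => exact absurd rfl hL
  | cons n t =>
    simp only [maxG]
    have := gSteps_pos n (h1 n (by simp))
    omega

-- max(counts) is exactly maxG: the running-max foldl over the mapped list
theorem foldl_max_maxG (t : List Int) (x : Int) (hx : 0 ≤ x) :
    (t.map gSteps).foldl max x = max x (maxG t) := by
  induction t generalizing x with
  | nil => simp [maxG, max_eq_left hx]
  | cons n s ih =>
    simp only [List.map_cons, List.foldl_cons, maxG]
    rw [ih _ (le_trans hx (le_max_left _ _))]
    rw [max_assoc]

theorem max?_map_eq (L : List Int) (hL : L ≠ []) :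
    PySem.List.max? (L.map gSteps) (fun x => x) = some (maxG L) := by
  cases L with
  | nil => exact absurd rfl hL
  | cons n t =>
    rw [List.map_cons, PySem.List.max?_id_cons]
    rw [foldl_max_maxG t (gSteps n) (gSteps_nonneg n)]
    simp [maxG]

-- counts.index(v) points at the first element of L whose gSteps is v
theorem index?_firstG (L : List Int) (v : Int) (hv : v ∈ L.map gSteps) :
    ∃ k, PySem.List.index? (L.map gSteps) v = some k ∧ k < L.length ∧
      firstG L v = L.getD k 0 := by
  induction L with
  | nil => simp at hv
  | cons n t ih =>
    by_cases h : gSteps n = v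
    · refine ⟨0, ?_, by simp, ?_⟩
      · rw [List.map_cons, h, PySem.List.index?_cons_self]
      · simp [firstG, h]
    · have hv' : v ∈ t.map gSteps := by
        rcases List.mem_map.mp hv with ⟨a, ha, hga⟩
        rcases List.mem_cons.mp ha with rfl | ha'
        · exact absurd hga h
        · exact List.mem_map.mpr ⟨a, ha', hga⟩
      rcases ih hv' with ⟨k, hk, hkl, hf⟩
      refine ⟨k + 1, ?_, by simpa using Nat.succ_lt_succ hkl, ?_⟩
      · rw [List.map_cons, PySem.List.index?_cons_of_ne (t.map gSteps) h, hk]; rfl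
      · simp [firstG, h, hf]

theorem maxG_mem (L : List Int) (hL : L ≠ []) : maxG L ∈ L.map gSteps := by
  induction L with
  | nil => exact absurd rfl hL
  | cons n t ih =>
    simp only [maxG, List.map_cons]
    by_cases ht : t = []
    · subst ht
      simp [maxG, max_eq_left (gSteps_nonneg n)]
    · by_cases h : maxG t ≤ gSteps n
      · rw [max_eq_left h]; exact List.mem_cons_self
      · rw [max_eq_right (le_of_not_ge h)]
        exact List.mem_cons_of_mem _ (ih ht)

-- ===== VERDICT (by name: the statement is the Claim_ definition above) =====
theorem find_max_collatz_steps_spec : Claim_equal_find_max_collatz_steps := by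
  intro limit _
  unfold Spec_find_max_collatz_steps find_max_collatz_steps find_max_collatz_steps_alt
  set L := PySem.List.pyRange 2 (limit + 1) 1 with hLdef
  have hmap : L.map (collatz_length 1000000) = L.map gSteps := rfl
  rw [hmap, foldA_char L 0 0 le_rfl]
  by_cases hL : L = []
  · simp [hL, maxG]
  · have hne2 : ∀ n ∈ L, n ≠ 1 := by
      intro n hn
      rw [hLdef, PySem.List.mem_pyRange_one] at hn
      omega
    have hpos := maxG_pos L hL hne2
    rw [if_pos (by omega), if_neg (by simpa using hL)]
    rw [max?_map_eq L hL]
    rcases index?_firstG L (maxG L) (maxG_mem L hL) with ⟨k, hk, hkl, hf⟩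
    show [maxG L, firstG L (maxG L)] =
      [(some (maxG L)).getD 0,
       (((PySem.List.index? (L.map gSteps) ((some (maxG L)).getD 0)).getD 0 : Nat) : Int) + 2]
    simp only [Option.getD_some]
    rw [hk]
    simp only [Option.getD_some]
    have hget : L.getD k 0 = 2 + (k : Int) := by
      rw [hLdef] at hkl ⊢
      rw [List.getD_eq_getElem _ _ hkl]
      exact PySem.List.getElem_pyRange_one ..
    rw [hf, hget, Int.add_comm]
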